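-- pv_equiv track=rewrite | github.com/alexisjohann/ALPLASTBK | scripts/generate_chapter_tables.py | generate_category_counts
-- ===== SOURCE A (Python) =====
-- from collections import defaultdict
--
-- def generate_category_counts(data):
--     """Generate the category counts table."""
--     by_category = defaultdict(int)
--     for app in data.get('appendices', []):
--         by_category[app['category']] += 1
--
--     lines = []
--     lines.append(r"\begin{table}[htbp]")
--     lines.append(r"\centering")
--     lines.append(r"\caption{Appendix Categories Overview}")
--     lines.append(r"\label{tab:index-categories}")
--     lines.append(r"\renewcommand{\arraystretch}{1.4}")
--     lines.append(r"\begin{tabular}{@{}clcl@{}}")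
--     lines.append(r"\toprule")
--     lines.append(r"\textbf{Prefix} & \textbf{Category} & \textbf{Count} & \textbf{Purpose} \\")
--     lines.append(r"\midrule")
--
--     category_info = {
--         'CORE': ('Core Theory', 'Fundamental building blocks of EBF (10C + Hierarchy + EIT)'),
--         'FORMAL': ('Formalization', 'Mathematical foundations and proofs'),
--         'DOMAIN': ('Application Domains', 'Economics subfield applications'),
--         'CONTEXT': ('Context Dimensions', r'The $\Psi$ framework components'),
--         'METHOD': ('Methodology', 'Estimation and validation methods'),
--         'PREDICT': ('Predictions', 'Falsifiable predictions and cases'),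
--         'LIT': ('Literature', 'Research integration by author'),
--         'REF': ('Reference', 'Glossaries, examples, meta-theory'),
--     }
--
--     total = 0
--     for cat in ['CORE', 'FORMAL', 'DOMAIN', 'CONTEXT', 'METHOD', 'PREDICT', 'LIT', 'REF']:
--         count = by_category.get(cat, 0)
--         total += count
--         name, purpose = category_info.get(cat, (cat, ''))
--         lines.append(rf"\textbf{{{cat}-}} & {name} & {count} & {purpose} \\")
--
--     lines.append(r"\midrule")
--     lines.append(rf"& \textbf{{Total}} & \textbf{{{total}}} & \\")
--     lines.append(r"\bottomrule")
--     lines.append(r"\end{tabular}")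
--     lines.append(r"\end{table}")
--
--     return '\n'.join(lines)
-- ===== SOURCE B (Python) =====
-- def _runs(cats):
--     """Run-length encode an already-sorted list: [(value, length of its run), ...]."""
--     runs = []
--     i = 0
--     while i < len(cats):
--         j = i + 1
--         while j < len(cats) and cats[j] == cats[i]:
--             j += 1
--         runs.append((cats[i], j - i))
--         i = j
--     return runs
--
--
-- def _run_count(runs, cat):
--     """Length of cat's run, or 0 if cat has no run."""
--     for v, n in runs:
--         if v == cat:
--             return n
--     return 0
--
--
-- def generate_category_counts(data):
--     """Generate the category counts table (sort-based counting instead of a tally)."""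
--     cats = sorted(app['category'] for app in data.get('appendices', []))
--     runs = _runs(cats)
--
--     header = [
--         r"\begin{table}[htbp]",
--         r"\centering",
--         r"\caption{Appendix Categories Overview}",
--         r"\label{tab:index-categories}",
--         r"\renewcommand{\arraystretch}{1.4}",
--         r"\begin{tabular}{@{}clcl@{}}",
--         r"\toprule",
--         r"\textbf{Prefix} & \textbf{Category} & \textbf{Count} & \textbf{Purpose} \\",
--         r"\midrule",
--     ]
--
--     rows = []
--     total = 0
--     for cat, name, purpose in [
--         ('CORE', 'Core Theory', 'Fundamental building blocks of EBF (10C + Hierarchy + EIT)'),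
--         ('FORMAL', 'Formalization', 'Mathematical foundations and proofs'),
--         ('DOMAIN', 'Application Domains', 'Economics subfield applications'),
--         ('CONTEXT', 'Context Dimensions', r'The $\Psi$ framework components'),
--         ('METHOD', 'Methodology', 'Estimation and validation methods'),
--         ('PREDICT', 'Predictions', 'Falsifiable predictions and cases'),
--         ('LIT', 'Literature', 'Research integration by author'),
--         ('REF', 'Reference', 'Glossaries, examples, meta-theory'),
--     ]:
--         count = _run_count(runs, cat)
--         total += count
--         rows.append(rf"\textbf{{{cat}-}} & {name} & {count} & {purpose} \\")
--
--     footer = [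
--         r"\midrule",
--         rf"& \textbf{{Total}} & \textbf{{{total}}} & \\",
--         r"\bottomrule",
--         r"\end{tabular}",
--         r"\end{table}",
--     ]
--     return '\n'.join(header + rows + footer)
-- ===== Notes on version B (the rewrite author's own statement) =====
-- stated objective: alternative
-- what changed: B replaces A's defaultdict tally by a sort-based frequency algorithm: it sorts the list of category strings, run-length-encodes the sorted list into (value, run length) pairs, and reads each of the 8 counts off that encoding; the table is assembled as header/rows/footer lists joined once.
import Mathlib
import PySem

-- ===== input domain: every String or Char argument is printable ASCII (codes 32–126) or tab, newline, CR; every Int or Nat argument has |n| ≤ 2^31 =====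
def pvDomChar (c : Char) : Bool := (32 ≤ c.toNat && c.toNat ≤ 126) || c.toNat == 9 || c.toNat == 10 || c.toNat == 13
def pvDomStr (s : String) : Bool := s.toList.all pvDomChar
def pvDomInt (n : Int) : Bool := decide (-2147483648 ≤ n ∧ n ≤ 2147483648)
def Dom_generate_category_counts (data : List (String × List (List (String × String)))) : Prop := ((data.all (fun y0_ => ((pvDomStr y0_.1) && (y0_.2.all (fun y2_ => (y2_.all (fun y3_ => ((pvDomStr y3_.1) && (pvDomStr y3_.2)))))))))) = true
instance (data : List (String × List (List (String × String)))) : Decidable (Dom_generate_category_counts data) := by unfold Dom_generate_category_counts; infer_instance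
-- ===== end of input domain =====

-- B replaces A's defaultdict tally by a sort-based frequency algorithm: sort the category
-- strings, run-length-encode the sorted list, read the 8 counts off that encoding
-- (objective: alternative, same output). Side effects: none (A mutates nothing).

-- shared helper: app['category'] (dicts are assoc lists, first match; none = KeyError, excluded by Pre_)
def pvCat (app : List (String × String)) : String := (List.lookup "category" app).getD ""

-- ===== PORT A =====
def generate_category_counts (data : List (String × List (List (String × String)))) : String :=
  -- data.get('appendices', []) : first-match lookup
  let appendices := (List.lookup "appendices" data).getD []
  -- by_category = defaultdict(int); for app in appendices: by_category[app['category']] += 1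
  let byCategory : PySem.Dict String Int :=
    appendices.foldl (fun d app => d.modify (pvCat app) 0 (· + 1)) PySem.Dict.empty
  let lines : List String :=
    ["\\begin{table}[htbp]", "\\centering", "\\caption{Appendix Categories Overview}",
     "\\label{tab:index-categories}", "\\renewcommand{\\arraystretch}{1.4}",
     "\\begin{tabular}{@{}clcl@{}}", "\\toprule",
     "\\textbf{Prefix} & \\textbf{Category} & \\textbf{Count} & \\textbf{Purpose} \\\\",
     "\\midrule"]
  let categoryInfo : PySem.Dict String (String × String) := PySem.Dict.ofList
    [("CORE", ("Core Theory", "Fundamental building blocks of EBF (10C + Hierarchy + EIT)")),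
     ("FORMAL", ("Formalization", "Mathematical foundations and proofs")),
     ("DOMAIN", ("Application Domains", "Economics subfield applications")),
     ("CONTEXT", ("Context Dimensions", "The $\\Psi$ framework components")),
     ("METHOD", ("Methodology", "Estimation and validation methods")),
     ("PREDICT", ("Predictions", "Falsifiable predictions and cases")),
     ("LIT", ("Literature", "Research integration by author")),
     ("REF", ("Reference", "Glossaries, examples, meta-theory"))]
  -- total = 0; for cat in [...]: count = by_category.get(cat, 0); total += count; lines.append(...)
  let res := ["CORE", "FORMAL", "DOMAIN", "CONTEXT", "METHOD", "PREDICT", "LIT", "REF"].foldl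
    (fun (acc : Int × List String) cat =>
      let count := byCategory.getD cat 0
      let np := categoryInfo.getD cat (cat, "")
      (acc.1 + count,
       acc.2 ++ ["\\textbf{" ++ cat ++ "-} & " ++ np.1 ++ " & " ++ PySem.Int.toStr count ++ " & " ++ np.2 ++ " \\\\"]))
    ((0 : Int), lines)
  let lines2 := res.2 ++
    ["\\midrule", "& \\textbf{Total} & \\textbf{" ++ PySem.Int.toStr res.1 ++ "} & \\\\",
     "\\bottomrule", "\\end{tabular}", "\\end{table}"]
  PySem.Str.join "\n" lines2

-- ===== PORT B =====
-- _runs(cats): the outer while-loop consumes one run of the suffix per iteration;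
-- transcribed as the structural recursion on the suffix (inner 'while cats[j] == cats[i]'
-- is the takeWhile/dropWhile split of the tail at the head's run).
def pvRuns : List String → List (String × Int)
  | [] => []
  | a :: l =>
    (a, 1 + ((l.takeWhile (fun c => c == a)).length : Int)) :: pvRuns (l.dropWhile (fun c => c == a))
termination_by l => l.length
decreasing_by
  have := (List.dropWhile_sublist (l := l) (p := fun c => c == a)).length_le
  simp
  omega

-- _run_count(runs, cat): first matching run's length, else 0
def pvRunCount (runs : List (String × Int)) (cat : String) : Int :=
  match runs with
  | [] => 0
  | (v, n) :: t => if v == cat then n else pvRunCount t cat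

def generate_category_counts_alt (data : List (String × List (List (String × String)))) : String :=
  -- cats = sorted(app['category'] for app in data.get('appendices', []))
  let cats := PySem.List.sorted (((List.lookup "appendices" data).getD []).map pvCat) (fun c => c)
  let runs := pvRuns cats
  let header : List String :=
    ["\\begin{table}[htbp]", "\\centering", "\\caption{Appendix Categories Overview}",
     "\\label{tab:index-categories}", "\\renewcommand{\\arraystretch}{1.4}",
     "\\begin{tabular}{@{}clcl@{}}", "\\toprule",
     "\\textbf{Prefix} & \\textbf{Category} & \\textbf{Count} & \\textbf{Purpose} \\\\",
     "\\midrule"]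
  -- for cat, name, purpose in [...]: count = _run_count(runs, cat)
  let res := [("CORE", "Core Theory", "Fundamental building blocks of EBF (10C + Hierarchy + EIT)"),
              ("FORMAL", "Formalization", "Mathematical foundations and proofs"),
              ("DOMAIN", "Application Domains", "Economics subfield applications"),
              ("CONTEXT", "Context Dimensions", "The $\\Psi$ framework components"),
              ("METHOD", "Methodology", "Estimation and validation methods"),
              ("PREDICT", "Predictions", "Falsifiable predictions and cases"),
              ("LIT", "Literature", "Research integration by author"),
              ("REF", "Reference", "Glossaries, examples, meta-theory")].foldl
    (fun (acc : Int × List String) (row : String × String × String) =>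
      let count : Int := pvRunCount runs row.1
      (acc.1 + count,
       acc.2 ++ ["\\textbf{" ++ row.1 ++ "-} & " ++ row.2.1 ++ " & " ++ PySem.Int.toStr count ++ " & " ++ row.2.2 ++ " \\\\"]))
    ((0 : Int), ([] : List String))
  let footer : List String :=
    ["\\midrule", "& \\textbf{Total} & \\textbf{" ++ PySem.Int.toStr res.1 ++ "} & \\\\",
     "\\bottomrule", "\\end{tabular}", "\\end{table}"]
  PySem.Str.join "\n" (header ++ res.2 ++ footer)

-- ===== PRECONDITION & SPEC =====
-- Pre_ excludes exactly the inputs where some appendix entry lacks the key 'category':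
-- there both A and B raise KeyError.
def Pre_generate_category_counts (data : List (String × List (List (String × String)))) : Prop :=
  (((List.lookup "appendices" data).getD []).all (fun app => (List.lookup "category" app).isSome)) = true
instance (data : List (String × List (List (String × String)))) : Decidable (Pre_generate_category_counts data) := by unfold Pre_generate_category_counts; infer_instance

def pvWitness_generate_category_counts : (List (String × List (List (String × String)))) :=
  [("appendices", [[("category", "CORE")], [("category", "LIT"), ("title", "x")]])]

def Spec_generate_category_counts (data : List (String × List (List (String × String)))) (out : String) : Prop := out = generate_category_counts_alt data
instance (data : List (String × List (List (String × String)))) (out : String) : Decidable (Spec_generate_category_counts data out) := by unfold Spec_generate_category_counts; infer_instance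

-- ===== CLAIM (what is proved, stated in full; the proofs are below) =====
def Claim_equal_generate_category_counts : Prop := ∀ (data : List (String × List (List (String × String)))), Dom_generate_category_counts data → Pre_generate_category_counts data → Spec_generate_category_counts data (generate_category_counts data)

-- ===== LEMMAS AND PROOFS =====
-- A's counter loop, started from any dict, adds the per-category count to the stored value.
lemma pv_dict_count (apps : List (List (String × String))) (cat : String) (d : PySem.Dict String Int) :
    (apps.foldl (fun d app => d.modify (pvCat app) 0 (· + 1)) d).getD cat 0
      = d.getD cat 0 + (apps.countP (fun app => pvCat app == cat) : Int) := by
  induction apps generalizing d with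
  | nil => simp
  | cons a l ih =>
    rw [List.foldl_cons, ih, PySem.Dict.getD_modify, List.countP_cons]
    by_cases h : cat = pvCat a
    · subst h
      simp
      ring
    · have hb : (pvCat a == cat) = false := beq_eq_false_iff_ne.mpr (fun hx => h hx.symm)
      simp [h, hb]

-- On a sorted list, the run-length encoding's entry for x is x's multiplicity.
lemma pv_runs_count (x : String) : ∀ (l : List String), l.Pairwise (· ≤ ·) →
    pvRunCount (pvRuns l) x = (l.countP (fun c => c == x) : Int) := by
  intro l
  induction l using pvRuns.induct with
  | case1 => intro _; simp [pvRuns, pvRunCount]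
  | case2 a l ih =>
    intro hs
    have hsl : l.Pairwise (· ≤ ·) := List.Pairwise.of_cons hs
    have hale : ∀ y ∈ l, a ≤ y := fun y hy => List.rel_of_pairwise_cons hs hy
    have htw : ∀ y ∈ l.takeWhile (fun c => c == a), y = a := by
      intro y hy
      have hp := List.mem_takeWhile_imp (p := fun c => c == a) (l := l) (x := y) hy
      exact eq_of_beq hp
    have hdw_ne : ∀ y ∈ l.dropWhile (fun c => c == a), ¬ (y == a) = true := by
      intro y hy
      cases hdw : l.dropWhile (fun c => c == a) with
      | nil => rw [hdw] at hy; cases hy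
      | cons h t =>
        have hne' : l.dropWhile (fun c => c == a) ≠ [] := by rw [hdw]; simp
        have hh0 := List.head_dropWhile_not (fun c => c == a) hne'
        simp only [hdw, List.head_cons] at hh0
        have hhne : h ≠ a := by simpa using hh0
        have hmem : h ∈ l := (List.dropWhile_sublist (fun c => c == a)).subset (by rw [hdw]; simp)
        have hha : a < h := lt_of_le_of_ne (hale h hmem) (Ne.symm hhne)
        rw [hdw] at hy
        rcases List.mem_cons.mp hy with rfl | hyt
        · simpa using hhne
        · have hpt : (h :: t).Pairwise (fun x1 x2 : String => x1 ≤ x2) := by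
            have := List.Pairwise.sublist (List.dropWhile_sublist (fun c => c == a)) hsl
            rwa [hdw] at this
          have hay : a < y := lt_of_lt_of_le hha (List.rel_of_pairwise_cons hpt hyt)
          intro hq; rw [eq_of_beq hq] at hay; exact lt_irrefl a hay
    have hdec := List.takeWhile_append_dropWhile (p := fun c => c == a) (l := l)
    rw [pvRuns, pvRunCount]
    by_cases hx : a = x
    · subst hx
      rw [if_pos (show (a == a) = true by simp)]
      have h1 : (l.takeWhile (fun c => c == a)).countP (fun c => c == a)
          = (l.takeWhile (fun c => c == a)).length :=
        List.countP_eq_length.mpr (fun y hy => by rw [htw y hy]; simp)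
      have h2 : (l.dropWhile (fun c => c == a)).countP (fun c => c == a) = 0 :=
        List.countP_eq_zero.mpr hdw_ne
      have hc : l.countP (fun c => c == a) = (l.takeWhile (fun c => c == a)).length := by
        conv_lhs => rw [← hdec]
        rw [List.countP_append]
        omega
      have hcc : (a :: l).countP (fun c => c == a) = l.countP (fun c => c == a) + 1 := by
        rw [List.countP_cons]; simp
      rw [hcc, hc]
      push_cast
      ring
    · have hax : (a == x) = false := beq_eq_false_iff_ne.mpr hx
      rw [if_neg (show ¬ ((a == x) = true) by simp [hax])]
      rw [ih (List.Pairwise.sublist (List.dropWhile_sublist _) hsl)]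
      have h1 : (l.takeWhile (fun c => c == a)).countP (fun c => c == x) = 0 :=
        List.countP_eq_zero.mpr (fun y hy => by rw [htw y hy]; simpa using hx)
      have hc : l.countP (fun c => c == x) = (l.dropWhile (fun c => c == a)).countP (fun c => c == x) := by
        conv_lhs => rw [← hdec]
        rw [List.countP_append]
        omega
      rw [List.countP_cons]
      simp [hc, hax]

-- B's sort + run-length count equals A's counter-dict lookup (any appendix list).
lemma pv_count_eq (apps : List (List (String × String))) (cat : String) :
    pvRunCount (pvRuns (PySem.List.sorted (apps.map pvCat) (fun c => c))) cat
      = (apps.foldl (fun d app => d.modify (pvCat app) 0 (· + 1)) PySem.Dict.empty).getD cat 0 := by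
  rw [pv_dict_count]
  rw [pv_runs_count cat _ (by simpa using PySem.List.sorted_pairwise (apps.map pvCat) (fun c => c))]
  rw [(PySem.List.sorted_perm (apps.map pvCat) (fun c => c) false).countP_eq]
  rw [List.countP_map]
  simp [Function.comp_def, PySem.Dict.getD_empty]

-- ===== VERDICT (by name: the statement is the Claim_ definition above) =====
theorem generate_category_counts_spec : Claim_equal_generate_category_counts := by
  intro data _ _
  unfold Spec_generate_category_counts generate_category_counts generate_category_counts_alt
  simp only [List.foldl_cons, List.foldl_nil, pv_count_eq]
  rfl
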